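-- pv_equiv track=rewrite | github.com/nothingnesses/rust-fp-library | scripts/migrate_classes.py | process_examples_sections
-- ===== SOURCE A (Python) =====
-- def process_examples_sections(text: str) -> str:
--     """Convert /// ### Examples to #[document_examples]."""
--     lines = text.split("\n")
--     result = []
--
--     for line in lines:
--         stripped = line.lstrip("\t ")
--         if stripped == "/// ### Examples":
--             indent = line[: len(line) - len(line.lstrip("\t "))]
--             result.append(f"{indent}#[document_examples]")
--         else:
--             result.append(line)
--
--     return "\n".join(result)
-- ===== SOURCE B (Python) =====
-- def process_examples_sections(text: str) -> str:
--     """Convert /// ### Examples to #[document_examples]."""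
--     marker = "/// ### Examples"
--     pieces = []
--     i = 0
--     while True:
--         j = text.find("\n", i)
--         line = text[i:] if j == -1 else text[i:j]
--         if line.endswith(marker) and all(c in "\t " for c in line[: len(line) - len(marker)]):
--             line = line[: len(line) - len(marker)] + "#[document_examples]"
--         pieces.append(line)
--         if j == -1:
--             return "".join(pieces)
--         pieces.append("\n")
--         i = j + 1
-- ===== Notes on version B (the rewrite author's own statement) =====
-- stated objective: alternative
-- what changed: Instead of splitting the text into a list of lines, lstrip-comparing each line and joining an accumulator list with newlines, B scans the raw string once with find, recognises a marker line by a suffix test plus an all-tabs/spaces check on the prefix, and concatenates output pieces (lines and separators) once at the end.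
import Mathlib
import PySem

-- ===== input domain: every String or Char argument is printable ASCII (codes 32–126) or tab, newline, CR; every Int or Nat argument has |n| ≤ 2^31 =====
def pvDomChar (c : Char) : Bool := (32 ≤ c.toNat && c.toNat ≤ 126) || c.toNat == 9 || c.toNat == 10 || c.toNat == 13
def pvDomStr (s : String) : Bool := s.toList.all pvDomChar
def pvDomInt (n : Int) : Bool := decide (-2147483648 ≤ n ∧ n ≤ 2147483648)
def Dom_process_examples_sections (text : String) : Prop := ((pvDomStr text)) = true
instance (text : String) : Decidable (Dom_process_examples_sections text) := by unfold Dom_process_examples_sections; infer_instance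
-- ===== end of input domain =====

-- B replaces A's split/lstrip-equality/join pipeline with a single scan that cuts lines
-- at '\n' and recognises a marker line by a suffix test plus an all-tabs/spaces prefix check
-- (alternative decomposition, same O(n) cost).


-- ===== PORT A =====
-- text.split("\n") → PySem.Chars.splitOn; line.lstrip("\t ") → dropWhile (c == '\t' || c == ' ') (exact);
-- result accumulator list + "\n".join → foldl + PySem.Chars.join.
def process_examples_sections (text : String) : String :=
  let lines := PySem.Chars.splitOn text.toList ['\n']
  let result := lines.foldl (fun res line =>
    let stripped := line.dropWhile (fun c => c == '\t' || c == ' ')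
    if stripped = "/// ### Examples".toList then
      res ++ [line.take (line.length - stripped.length) ++ "#[document_examples]".toList]
    else
      res ++ [line]) []
  String.mk (PySem.Chars.join ['\n'] result)

-- ===== PORT B =====
-- B's per-line test: line.endswith(marker) and all chars of the prefix are tab/space.
def pvFixLine (line : List Char) : List Char :=
  if PySem.Chars.endswith line "/// ### Examples".toList
      && (line.take (line.length - 16)).all (fun c => c == '\t' || c == ' ') then
    line.take (line.length - 16) ++ "#[document_examples]".toList
  else line

-- B's while loop: text.find("\n", i) / the slice up to it ported as the takeWhile/dropWhile
-- split of the remaining suffix (exact); the pieces list joined by "" is the concatenation.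
def pvLoopB (cs : List Char) : List Char :=
  let line := cs.takeWhile (fun c => c != '\n')
  match h : cs.dropWhile (fun c => c != '\n') with
  | [] => pvFixLine line
  | _ :: tl => pvFixLine line ++ '\n' :: pvLoopB tl
termination_by cs.length
decreasing_by
  have h1 : (cs.dropWhile (fun c => c != '\n')).length ≤ cs.length :=
    List.length_dropWhile_le _ _
  rw [h] at h1
  simp at h1
  omega

def process_examples_sections_alt (text : String) : String :=
  String.mk (pvLoopB text.toList)

-- ===== PRECONDITION & SPEC =====
def Spec_process_examples_sections (text : String) (out : String) : Prop := out = process_examples_sections_alt text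
instance (text : String) (out : String) : Decidable (Spec_process_examples_sections text out) := by unfold Spec_process_examples_sections; infer_instance

-- ===== CLAIM (what is proved, stated in full; the proofs are below) =====
def Claim_equal_process_examples_sections : Prop := ∀ (text : String), Dom_process_examples_sections text → Spec_process_examples_sections text (process_examples_sections text)

-- ===== LEMMAS AND PROOFS =====

def pvFixA (line : List Char) : List Char :=
  let stripped := line.dropWhile (fun c => c == '\t' || c == ' ')
  if stripped = "/// ### Examples".toList then
    line.take (line.length - stripped.length) ++ "#[document_examples]".toList
  else line

def pvSplitNl (cs : List Char) : List (List Char) :=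
  let line := cs.takeWhile (fun c => c != '\n')
  match h : cs.dropWhile (fun c => c != '\n') with
  | [] => [line]
  | _ :: tl => line :: pvSplitNl tl
termination_by cs.length
decreasing_by
  have h1 : (cs.dropWhile (fun c => c != '\n')).length ≤ cs.length :=
    List.length_dropWhile_le _ _
  rw [h] at h1; simp at h1; omega

lemma pvSplitNl_ne_nil (cs : List Char) : pvSplitNl cs ≠ [] := by
  rw [pvSplitNl]; split <;> simp

lemma pvSplitNl_cons_nl (rest : List Char) :
    pvSplitNl ('\n' :: rest) = [] :: pvSplitNl rest := by
  rw [pvSplitNl]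
  split
  next h => simp at h
  next head tl h =>
    simp at h
    simp [h.2]

lemma pvSplitNl_cons_ne (c : Char) (rest q : List Char) (qs : List (List Char))
    (hc : ¬ c = '\n') (h : pvSplitNl rest = q :: qs) :
    pvSplitNl (c :: rest) = (c :: q) :: qs := by
  rw [pvSplitNl] at h ⊢
  split
  next h1 =>
    rw [List.dropWhile_cons] at h1
    simp only [hc, if_true, bne_iff_ne, ne_eq, not_false_eq_true, decide_true] at h1
    split at h
    next h2 =>
      simp at h
      simp [List.takeWhile_cons, hc, h.1, h.2]
    next head tl h2 => rw [h1] at h2; exact absurd h2.symm (List.cons_ne_nil _ _)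
  next head tl h1 =>
    rw [List.dropWhile_cons] at h1
    simp only [hc, if_true, bne_iff_ne, ne_eq, not_false_eq_true, decide_true] at h1
    split at h
    next h2 => rw [h2] at h1; exact absurd h1.symm (List.cons_ne_nil _ _)
    next head2 tl2 h2 =>
      rw [h1] at h2
      cases h2
      obtain ⟨ha, hb⟩ := by simpa using h
      simp [hc, ha, hb]

lemma pvGo_spec : ∀ (fuel : Nat) (l cur : List Char) (acc : List (List Char))
    (p : List Char) (ps : List (List Char)), l.length < fuel → pvSplitNl l = p :: ps →
    PySem.Chars.splitOn.go ['\n'] fuel l cur acc = acc.reverse ++ (cur.reverse ++ p) :: ps := by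
  intro fuel
  induction fuel with
  | zero => intro l cur acc p ps h; omega
  | succ fuel ih =>
    intro l cur acc p ps hlen hsplit
    cases l with
    | nil =>
      rw [pvSplitNl] at hsplit
      simp at hsplit
      obtain ⟨hp, hps⟩ := hsplit
      subst hp; subst hps
      simp [PySem.Chars.splitOn.go]
    | cons c rest =>
      rw [PySem.Chars.splitOn.go]
      by_cases hc : c = '\n'
      · subst hc
        have hpre : List.isPrefixOf ['\n'] ('\n' :: rest) = true := by simp [List.isPrefixOf]
        rw [if_pos hpre]
        rw [pvSplitNl_cons_nl] at hsplit
        obtain ⟨q, qs, hq⟩ : ∃ q qs, pvSplitNl rest = q :: qs := by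
          cases hs : pvSplitNl rest with
          | nil => exact absurd hs (pvSplitNl_ne_nil rest)
          | cons a b => exact ⟨a, b, rfl⟩
        rw [hq] at hsplit
        obtain ⟨hp, hps⟩ := by simpa using hsplit
        subst hp; subst hps
        have := ih rest [] (cur.reverse :: acc) q qs (by simp at hlen ⊢; omega) hq
        simpa using this
      · have hpre : List.isPrefixOf ['\n'] (c :: rest) = false := by
          simp [List.isPrefixOf]
          exact fun h => absurd h.symm hc
        rw [if_neg (by simp [hpre])]
        obtain ⟨q, qs, hq⟩ : ∃ q qs, pvSplitNl rest = q :: qs := by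
          cases hs : pvSplitNl rest with
          | nil => exact absurd hs (pvSplitNl_ne_nil rest)
          | cons a b => exact ⟨a, b, rfl⟩
        rw [pvSplitNl_cons_ne c rest q qs hc hq] at hsplit
        obtain ⟨hp, hps⟩ := by simpa using hsplit
        subst hps
        have := ih rest (c :: cur) acc q qs (by simp at hlen ⊢; omega) hq
        rw [this, ← hp]
        simp

lemma pvSplitOn_nl (cs : List Char) :
    PySem.Chars.splitOn cs ['\n'] = pvSplitNl cs := by
  obtain ⟨p, ps, h⟩ : ∃ p ps, pvSplitNl cs = p :: ps := by
    cases hs : pvSplitNl cs with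
    | nil => exact absurd hs (pvSplitNl_ne_nil cs)
    | cons a b => exact ⟨a, b, rfl⟩
  rw [PySem.Chars.splitOn, pvGo_spec (cs.length + 1) cs [] [] p ps (by omega) h, h]
  simp

lemma pvFix_eq (line : List Char) : pvFixA line = pvFixLine line := by
  simp only [pvFixA, pvFixLine]
  set p : Char → Bool := fun c => c == '\t' || c == ' ' with hp
  set M : List Char := "/// ### Examples".toList with hM
  have hMlen : M.length = 16 := by decide
  have htd : line.takeWhile p ++ line.dropWhile p = line := List.takeWhile_append_dropWhile
  by_cases hd : line.dropWhile p = M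
  · rw [if_pos hd, hd]
    obtain ⟨t, hline, hallt⟩ : ∃ t, line = t ++ M ∧ ∀ c ∈ t, p c = true :=
      ⟨line.takeWhile p, htd.symm.trans (by rw [hd]), fun c h => List.mem_takeWhile_imp h⟩
    subst hline
    have htake0 : (t ++ M).take ((t ++ M).length - M.length) = t := by simp
    have htake : (t ++ M).take ((t ++ M).length - 16) = t := by rw [← hMlen]; exact htake0
    rw [htake]
    have hend : PySem.Chars.endswith (t ++ M) M = true := by
      rw [PySem.Chars.endswith_iff]
      exact ⟨t, rfl⟩
    have hall : t.all p = true := List.all_eq_true.mpr hallt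
    rw [if_pos (by simp [hend, hall]), htake0]
  · rw [if_neg hd]
    by_cases hcond : (PySem.Chars.endswith line M &&
        (line.take (line.length - 16)).all p) = true
    · exfalso
      simp only [Bool.and_eq_true] at hcond
      obtain ⟨hend, hall⟩ := hcond
      rw [PySem.Chars.endswith_iff] at hend
      obtain ⟨pre, hpre⟩ := hend
      subst hpre
      have htake : (pre ++ M).take ((pre ++ M).length - 16) = pre := by
        rw [← hMlen]
        simp [List.take_append]
      rw [htake] at hall
      have hdpre : pre.dropWhile p = [] := by
        rw [List.dropWhile_eq_nil_iff]
        intro x hx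
        exact (List.all_eq_true.mp hall) x hx
      refine hd ?_
      rw [List.dropWhile_append, hdpre]
      simp [hM, hp]
    · rw [if_neg hcond]

lemma pvJoin_map (cs : List Char) :
    PySem.Chars.join ['\n'] ((pvSplitNl cs).map pvFixLine) = pvLoopB cs := by
  induction cs using pvLoopB.induct with
  | case1 cs heq =>
    rw [pvLoopB, pvSplitNl]
    split
    · rw [List.map_singleton, PySem.Chars.join_singleton]
    · next h2 => rw [heq] at h2; exact absurd h2.symm (List.cons_ne_nil _ _)
  | case2 cs hd tlc hdrop ih =>
    rw [pvLoopB, pvSplitNl]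
    split
    · next h2 => rw [hdrop] at h2; exact absurd h2 (List.cons_ne_nil _ _)
    · next c2 tl2 h2 =>
      rw [hdrop] at h2
      cases h2
      obtain ⟨q, qs, hq⟩ : ∃ q qs, pvSplitNl tlc = q :: qs := by
        cases hs : pvSplitNl tlc with
        | nil => exact absurd hs (pvSplitNl_ne_nil tlc)
        | cons a b => exact ⟨a, b, rfl⟩
      rw [hq, List.map_cons, List.map_cons, PySem.Chars.join_cons_cons, ← List.map_cons, ← hq, ih]
      simp

-- ===== VERDICT (by name: the statement is the Claim_ definition above) =====
theorem process_examples_sections_spec : Claim_equal_process_examples_sections := by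
  intro text _
  unfold Spec_process_examples_sections process_examples_sections process_examples_sections_alt
  have hfold : ∀ (lines : List (List Char)),
      lines.foldl (fun res line =>
        let stripped := line.dropWhile (fun c => c == '\t' || c == ' ')
        if stripped = "/// ### Examples".toList then
          res ++ [line.take (line.length - stripped.length) ++ "#[document_examples]".toList]
        else res ++ [line]) [] = lines.map pvFixA := by
    intro lines
    have : (fun (res : List (List Char)) (line : List Char) =>
        let stripped := line.dropWhile (fun c => c == '\t' || c == ' ')
        if stripped = "/// ### Examples".toList then
          res ++ [line.take (line.length - stripped.length) ++ "#[document_examples]".toList]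
        else res ++ [line]) = fun res line => res ++ [pvFixA line] := by
      funext res line
      simp only [pvFixA]
      split <;> rfl
    rw [this, PySem.List.foldl_append_singleton_eq_map]
    simp
  simp only [hfold]
  have hmap : (PySem.Chars.splitOn text.toList ['\n']).map pvFixA
      = (pvSplitNl text.toList).map pvFixLine := by
    rw [pvSplitOn_nl]
    exact List.map_congr_left (fun l _ => pvFix_eq l)
  rw [hmap, pvJoin_map]
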